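-- pv_equiv track=rewrite | github.com/androu07/proyectoCloud | zcluster_linux_scripts/headnode/orquestador/vnc_manager.py | find_available_ports
-- ===== SOURCE A (Python) =====
-- from typing import Dict, List, Optional, Set
--
-- VNC_PORT_MIN = 1
--
-- VNC_PORT_MAX = 1000
--
-- def find_available_ports(worker: str, count: int,
--                         used_ports: Dict[str, Set[int]]) -> Optional[List[int]]:
--     """
--     Encuentra 'count' puertos disponibles para un worker
--
--     Args:
--         worker: Nombre del worker (worker1/2/3)
--         count: Número de puertos necesarios
--         used_ports: Dict de puertos ya usados
--
--     Returns:
--         Lista de puertos disponibles o None si no hay suficientes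
--     """
--     # Obtener puertos ocupados (o conjunto vacío si no hay)
--     occupied = used_ports.get(worker, set())
--     available = []
--
--     # Buscar puertos disponibles en el rango
--     for port in range(VNC_PORT_MIN, VNC_PORT_MAX + 1):
--         if port not in occupied:
--             available.append(port)
--             if len(available) == count:
--                 return available
--
--     # No hay suficientes puertos disponibles
--     return None
-- ===== SOURCE B (Python) =====
-- VNC_PORT_MIN = 1
--
-- VNC_PORT_MAX = 1000
--
-- def find_available_ports(worker, count, used_ports):
--     if count < 1:
--         return None
--     # Walk the gaps between the sorted occupied ports instead of scanning the whole range.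
--     blocked = sorted(p for p in used_ports.get(worker, set())
--                      if VNC_PORT_MIN <= p <= VNC_PORT_MAX)
--     result = []
--     lo = VNC_PORT_MIN
--     for b in blocked:
--         take = min(count - len(result), b - lo)
--         if take > 0:
--             result.extend(range(lo, lo + take))
--         if len(result) == count:
--             return result
--         lo = b + 1
--     take = min(count - len(result), VNC_PORT_MAX + 1 - lo)
--     if take > 0:
--         result.extend(range(lo, lo + take))
--     return result if len(result) == count else None
-- ===== Notes on version B (the rewrite author's own statement) =====
-- stated objective: alternative
-- what changed: Instead of scanning every port in the range and testing set membership, B sorts the (in-range) occupied ports and walks the free gaps between consecutive occupied ports, emitting whole runs of free ports until count are collected.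
import Mathlib
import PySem

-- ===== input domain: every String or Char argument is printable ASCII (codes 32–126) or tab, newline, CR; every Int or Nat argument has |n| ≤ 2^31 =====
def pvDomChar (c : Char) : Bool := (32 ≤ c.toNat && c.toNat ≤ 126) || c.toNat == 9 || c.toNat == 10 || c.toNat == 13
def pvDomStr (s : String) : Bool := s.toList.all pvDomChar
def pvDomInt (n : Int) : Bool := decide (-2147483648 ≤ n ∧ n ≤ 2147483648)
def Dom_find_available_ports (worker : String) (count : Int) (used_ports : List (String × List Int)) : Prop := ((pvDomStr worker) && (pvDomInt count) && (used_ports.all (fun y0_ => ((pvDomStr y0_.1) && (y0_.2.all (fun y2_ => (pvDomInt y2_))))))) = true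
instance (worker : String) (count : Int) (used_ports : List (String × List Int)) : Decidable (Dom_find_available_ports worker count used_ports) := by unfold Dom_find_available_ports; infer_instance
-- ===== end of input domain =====

-- B sorts the occupied in-range ports and walks the free gaps between consecutive occupied
-- ports, emitting whole runs of free ports, instead of A's per-port membership scan of the
-- whole range; objective: alternative algorithm.

-- ===== PORT A =====
-- A's for-loop: accumulator `acc` (Python's `available`), early return when len(available) == count
def favGo (occupied : List Int) (count : Int) : List Int → List Int → Option (List Int)
  | [], _acc => none
  | p :: rest, acc =>
    if occupied.contains p then favGo occupied count rest acc
    else if ((acc.length : Int) + 1 = count) then some (acc ++ [p])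
    else favGo occupied count rest (acc ++ [p])

def find_available_ports (worker : String) (count : Int) (used_ports : List (String × List Int)) : Option (List Int) :=
  favGo ((PySem.Dict.mk used_ports).getD worker []) count (PySem.List.pyRange 1 (1000 + 1) 1) []

-- ===== PORT B =====
-- B's for-loop over the sorted occupied ports: state = (result, lo); the trailing let-free
-- tail case mirrors the code after the Python loop.
def gapGo (count : Int) : List Int → List Int → Int → Option (List Int)
  | [], result, lo =>
      let take := min (count - (result.length : Int)) (1000 + 1 - lo)
      let result' := if 0 < take then result ++ PySem.List.pyRange lo (lo + take) 1 else result
      if (result'.length : Int) = count then some result' else none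
  | b :: rest, result, lo =>
      let take := min (count - (result.length : Int)) (b - lo)
      let result' := if 0 < take then result ++ PySem.List.pyRange lo (lo + take) 1 else result
      if (result'.length : Int) = count then some result'
      else gapGo count rest result' (b + 1)

def find_available_ports_alt (worker : String) (count : Int) (used_ports : List (String × List Int)) : Option (List Int) :=
  if count < 1 then none
  else gapGo count
    (PySem.List.sorted ((((PySem.Dict.mk used_ports).getD worker []).filter (fun p => decide (1 ≤ p ∧ p ≤ 1000)))) (fun x => x) false)
    [] 1

-- ===== PRECONDITION & SPEC =====
def Spec_find_available_ports (worker : String) (count : Int) (used_ports : List (String × List Int)) (out : Option (List Int)) : Prop := out = find_available_ports_alt worker count used_ports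
instance (worker : String) (count : Int) (used_ports : List (String × List Int)) (out : Option (List Int)) : Decidable (Spec_find_available_ports worker count used_ports out) := by unfold Spec_find_available_ports; infer_instance

-- ===== CLAIM (what is proved, stated in full; the proofs are below) =====
def Claim_equal_find_available_ports : Prop := ∀ (worker : String) (count : Int) (used_ports : List (String × List Int)), Dom_find_available_ports worker count used_ports → Spec_find_available_ports worker count used_ports (find_available_ports worker count used_ports)

-- ===== LEMMAS AND PROOFS =====

-- free ports in [lo, 1000] avoiding the list bs
def freeFrom (lo : Int) (bs : List Int) : List Int :=
  (PySem.List.pyRange lo 1001 1).filter (fun p => !bs.contains p)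

-- a prefix of an int range is a shorter range
lemma pyRange_take (a b k : Int) (h0 : 0 ≤ k) (h : k ≤ b - a) :
    (PySem.List.pyRange a b 1).take k.toNat = PySem.List.pyRange a (a + k) 1 := by
  rw [PySem.List.pyRange_one_append a (a + k) b (by omega) (by omega)]
  exact List.take_left' (by rw [PySem.List.length_pyRange_one]; omega)

-- characterisation of A's early-exit scan (same lemma as the direct proof of A's shape)
lemma favGo_eq (occ : List Int) (count : Int) (ports : List Int) :
    ∀ acc : List Int,
      favGo occ count ports acc =
        (if (acc.length : Int) < count ∧
            count ≤ (acc.length : Int) + ((ports.filter (fun p => !occ.contains p)).length : Int)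
         then some (acc ++ (ports.filter (fun p => !occ.contains p)).take (count - acc.length).toNat)
         else none) := by
  induction ports with
  | nil =>
    intro acc
    rw [favGo]
    rw [if_neg (by simp only [List.filter_nil, List.length_nil]; push_cast; omega)]
  | cons p rest ih =>
    intro acc
    by_cases hc : occ.contains p
    · have hfil : (p :: rest).filter (fun q => !occ.contains q)
          = rest.filter (fun q => !occ.contains q) := by
        rw [List.filter_cons, if_neg (by simpa using hc)]
      rw [favGo, if_pos hc, ih acc, hfil]
    · have hc' : occ.contains p = false := by simpa using hc
      have hfil : (p :: rest).filter (fun q => !occ.contains q)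
          = p :: rest.filter (fun q => !occ.contains q) := by
        rw [List.filter_cons, if_pos (by simpa using hc')]
      rw [favGo, if_neg (by simpa using hc'), hfil]
      by_cases hq : (acc.length : Int) + 1 = count
      · rw [if_pos hq, if_pos (by simp only [List.length_cons]; push_cast; omega)]
        have ht : (count - (acc.length : Int)).toNat = 1 := by omega
        simp [ht]
      · rw [if_neg hq, ih (acc ++ [p])]
        by_cases hlt : (acc.length : Int) + 1 < count ∧
            count ≤ (acc.length : Int) + 1 + ((rest.filter (fun q => !occ.contains q)).length : Int)
        · rw [if_pos (by simp only [List.length_append, List.length_cons, List.length_nil]; push_cast; omega),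
              if_pos (by simp only [List.length_cons]; push_cast; omega)]
          have ht : (count - (acc.length : Int)).toNat
              = (count - ((acc.length : Int) + 1)).toNat + 1 := by omega
          simp [ht, List.take_succ_cons]
        · rw [if_neg (by simp only [List.length_append, List.length_cons, List.length_nil]; push_cast; omega),
              if_neg (by simp only [List.length_cons]; push_cast; omega)]

-- splitting the free ports at the smallest blocked port b (lo ≤ b ≤ 1000, rest ≥ b)
lemma freeFrom_cons_split (lo b : Int) (rest : List Int)
    (hlo : lo ≤ b) (hb : b ≤ 1000) (hrest : ∀ x ∈ rest, b ≤ x) :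
    freeFrom lo (b :: rest) = PySem.List.pyRange lo b 1 ++ freeFrom (b + 1) rest := by
  unfold freeFrom
  rw [PySem.List.pyRange_one_append lo b 1001 hlo (by omega),
      PySem.List.pyRange_one_cons (show b < 1001 by omega), List.filter_append, List.filter_cons]
  have h1 : (PySem.List.pyRange lo b 1).filter (fun p => !(b :: rest).contains p)
      = PySem.List.pyRange lo b 1 := by
    rw [List.filter_eq_self]
    intro p hp
    have hp' := (PySem.List.mem_pyRange_one).1 hp
    have hnb : (p == b) = false := by simp; omega
    have hpnr : p ∉ rest := fun hm => by have := hrest p hm; omega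
    have hnr : rest.contains p = false := by simpa using hpnr
    simp
    exact ⟨by omega, hpnr⟩
  have h2 : (!(b :: rest).contains b) = false := by simp
  have h3 : (PySem.List.pyRange (b + 1) 1001 1).filter (fun p => !(b :: rest).contains p)
      = (PySem.List.pyRange (b + 1) 1001 1).filter (fun p => !rest.contains p) := by
    apply List.filter_congr
    intro p hp
    have hp' := (PySem.List.mem_pyRange_one).1 hp
    have hnb : (p == b) = false := by simp; omega
    simp only [List.contains_cons, hnb, Bool.false_or]
  rw [h1, h2, h3]
  simp

-- characterisation of B's gap walk
lemma gapGo_eq (count : Int) :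
    ∀ (bs : List Int), bs.Pairwise (· ≤ ·) →
    ∀ (lo : Int) (result : List Int),
      (∀ x ∈ bs, lo - 1 ≤ x ∧ x ≤ 1000) →
      (result.length : Int) < count →
      gapGo count bs result lo =
        (if count ≤ (result.length : Int) + ((freeFrom lo bs).length : Int)
         then some (result ++ (freeFrom lo bs).take (count - result.length).toNat)
         else none) := by
  intro bs
  induction bs with
  | nil =>
    intro _ lo result _ hlt
    rw [gapGo]
    have hfree : freeFrom lo [] = PySem.List.pyRange lo 1001 1 := by
      unfold freeFrom; simp
    have hlen : ((PySem.List.pyRange lo 1001 1).length : Int) = max 0 (1001 - lo) := by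
      rw [PySem.List.length_pyRange_one]; omega
    by_cases h : count ≤ (result.length : Int) + ((freeFrom lo []).length : Int)
    · rw [if_pos h]
      rw [hfree] at h ⊢
      set rem := count - (result.length : Int) with hrem
      have hrem0 : 0 < rem := by omega
      have hremle : rem ≤ 1001 - lo := by omega
      have htk : min (count - (result.length : Int)) (1000 + 1 - lo) = rem := by omega
      rw [htk, if_pos hrem0]
      have hlen' : ((PySem.List.pyRange lo (lo + rem) 1).length : Int) = rem := by
        rw [PySem.List.length_pyRange_one]; omega
      rw [if_pos (by simp only [List.length_append]; push_cast; omega)]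
      rw [pyRange_take lo 1001 rem (by omega) (by omega)]
    · rw [if_neg h]
      rw [hfree] at h
      have hlen1 : ((PySem.List.pyRange lo 1001 1).length : Int) = max 0 (1001 - lo) := hlen
      by_cases hpos : 0 < min (count - (result.length : Int)) (1000 + 1 - lo)
      · rw [if_pos hpos]
        have hmin : min (count - (result.length : Int)) (1000 + 1 - lo) = 1001 - lo := by omega
        rw [hmin]
        have hlen2 : ((PySem.List.pyRange lo (lo + (1001 - lo)) 1).length : Int) = 1001 - lo := by
          rw [PySem.List.length_pyRange_one]; omega
        rw [if_neg (show ¬ (((result ++ PySem.List.pyRange lo (lo + (1001 - lo)) 1).length : Int) = count) by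
          simp only [List.length_append]; push_cast at hlen1 hlen2 ⊢; omega)]
      · rw [if_neg hpos, if_neg (by omega)]
  | cons b rest ih =>
    intro hpw lo result hbnd hlt
    have hrest_ge : ∀ x ∈ rest, b ≤ x := by
      intro x hx; exact (List.pairwise_cons.1 hpw).1 x hx
    have hpw' : rest.Pairwise (· ≤ ·) := (List.pairwise_cons.1 hpw).2
    have hb := hbnd b (by simp)
    rw [gapGo]
    by_cases hblo : b < lo
    · -- b = lo - 1: gap is empty and b blocks nothing in [lo, 1000]
      have hbe : b = lo - 1 := by omega
      have hfree : freeFrom lo (b :: rest) = freeFrom (b + 1) rest := by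
        unfold freeFrom
        have : b + 1 = lo := by omega
        rw [this]
        apply List.filter_congr
        intro p hp
        have hp' := (PySem.List.mem_pyRange_one).1 hp
        have hnb : (p == b) = false := by simp; omega
        simp only [List.contains_cons, hnb, Bool.false_or]
      have htk : ¬ 0 < min (count - (result.length : Int)) (b - lo) := by omega
      rw [if_neg htk, if_neg (by omega)]
      rw [ih hpw' (b + 1) result (fun x hx => ⟨by have := hrest_ge x hx; omega, (hbnd x (by simp [hx])).2⟩) hlt]
      rw [hfree]
    · -- lo ≤ b: free gap [lo, b-1] then recurse past b
      have hlob : lo ≤ b := by omega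
      have hsplit := freeFrom_cons_split lo b rest hlob hb.2 hrest_ge
      have hgaplen : ((PySem.List.pyRange lo b 1).length : Int) = b - lo := by
        rw [PySem.List.length_pyRange_one]; omega
      set rem := count - (result.length : Int) with hrem
      have hrem0 : 0 < rem := by omega
      by_cases hle : rem ≤ b - lo
      · -- enough free ports before b: early return
        have htk : min (count - (result.length : Int)) (b - lo) = rem := by omega
        rw [htk, if_pos hrem0]
        have hlen' : ((PySem.List.pyRange lo (lo + rem) 1).length : Int) = rem := by
          rw [PySem.List.length_pyRange_one]; omega
        rw [if_pos (by simp only [List.length_append]; push_cast; omega)]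
        rw [hsplit]
        rw [if_pos (by simp only [List.length_append]; push_cast; omega)]
        rw [List.take_append]
        have h1 : (PySem.List.pyRange lo b 1).take (count - (result.length : Int)).toNat
            = PySem.List.pyRange lo (lo + rem) 1 := by
          rw [← hrem, pyRange_take lo b rem (by omega) (by omega)]
        have h2 : (count - (result.length : Int)).toNat - (PySem.List.pyRange lo b 1).length = 0 := by
          omega
        rw [h1, h2]
        simp
      · -- take the whole gap and continue after b
        have htk : min (count - (result.length : Int)) (b - lo) = b - lo := by omega
        rw [htk]
        have hres' : (if 0 < b - lo then result ++ PySem.List.pyRange lo (lo + (b - lo)) 1 else result)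
            = result ++ PySem.List.pyRange lo b 1 := by
          by_cases hg : 0 < b - lo
          · rw [if_pos hg]; congr 2; omega
          · rw [if_neg hg, PySem.List.pyRange_one_eq_nil (by omega)]; simp
        rw [hres']
        have hlen' : ((result ++ PySem.List.pyRange lo b 1).length : Int)
            = (result.length : Int) + (b - lo) := by
          simp only [List.length_append]; push_cast; omega
        rw [if_neg (by omega)]
        rw [ih hpw' (b + 1) (result ++ PySem.List.pyRange lo b 1)
              (fun x hx => ⟨by have := hrest_ge x hx; omega, (hbnd x (by simp [hx])).2⟩)
              (by omega)]
        rw [hsplit]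
        by_cases hcond : count ≤ ((result ++ PySem.List.pyRange lo b 1).length : Int)
            + ((freeFrom (b + 1) rest).length : Int)
        · rw [if_pos hcond,
              if_pos (by simp only [List.length_append] at hcond ⊢; push_cast at hcond ⊢; omega)]
          rw [List.take_append]
          have h1 : (PySem.List.pyRange lo b 1).take (count - (result.length : Int)).toNat
              = PySem.List.pyRange lo b 1 :=
            List.take_of_length_le (by omega)
          have h2 : (count - (result.length : Int)).toNat - (PySem.List.pyRange lo b 1).length
              = (count - ((result ++ PySem.List.pyRange lo b 1).length : Int)).toNat := by
            simp only [List.length_append]; omega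
          rw [h1, h2, List.append_assoc]
        · rw [if_neg hcond,
              if_neg (by simp only [List.length_append] at hcond ⊢; push_cast at hcond ⊢; omega)]

theorem find_available_ports_spec_aux (worker : String) (count : Int)
    (used_ports : List (String × List Int)) :
    find_available_ports worker count used_ports
      = find_available_ports_alt worker count used_ports := by
  unfold find_available_ports find_available_ports_alt
  rw [favGo_eq]
  set occ := (PySem.Dict.mk used_ports).getD worker [] with hocc
  set blocked := PySem.List.sorted (occ.filter (fun p => decide (1 ≤ p ∧ p ≤ 1000))) (fun x => x) false with hblocked
  by_cases hc : count < 1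
  · rw [if_pos hc, if_neg (by simp only [List.length_nil, Int.natCast_zero, zero_add]; omega)]
  · rw [if_neg hc]
    have hmem : ∀ x, x ∈ blocked ↔ (x ∈ occ ∧ 1 ≤ x ∧ x ≤ 1000) := by
      intro x
      rw [hblocked, PySem.List.mem_sorted, List.mem_filter]
      simp
    have hpw : blocked.Pairwise (· ≤ ·) := by
      rw [hblocked]
      exact PySem.List.sorted_pairwise _ _
    rw [gapGo_eq count blocked hpw 1 []
          (fun x hx => by have := (hmem x).1 hx; omega)
          (by simpa using (show (0:Int) < count by omega))]
    have hfree : freeFrom 1 blocked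
        = (PySem.List.pyRange 1 (1000 + 1) 1).filter (fun p => !occ.contains p) := by
      unfold freeFrom
      have : (1001 : Int) = 1000 + 1 := by norm_num
      rw [this]
      apply List.filter_congr
      intro p hp
      have hp' := (PySem.List.mem_pyRange_one).1 hp
      have : blocked.contains p = occ.contains p := by
        by_cases hpb : p ∈ occ
        · have hb2 : p ∈ blocked := (hmem p).2 ⟨hpb, by omega, by omega⟩
          simp [hpb, hb2]
        · have hb2 : p ∉ blocked := fun h => hpb ((hmem p).1 h).1
          simp [hpb, hb2]
      rw [this]
    rw [hfree]
    simp only [List.length_nil, Int.natCast_zero, zero_add, Int.sub_zero, List.nil_append]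
    set free := (PySem.List.pyRange 1 (1000 + 1) 1).filter (fun p => !occ.contains p) with hfr
    by_cases h2 : count ≤ ((free.length : Int))
    · rw [if_pos ⟨by omega, h2⟩, if_pos h2]
    · rw [if_neg (fun hh => h2 hh.2), if_neg h2]

-- ===== VERDICT (by name: the statement is the Claim_ definition above) =====
theorem find_available_ports_spec : Claim_equal_find_available_ports := by
  intro worker count used_ports _
  exact find_available_ports_spec_aux worker count used_ports
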